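-- pv_equiv track=rewrite | github.com/mraesthetic/math-bop | old/games/1_0_gunslingers/redistribute_br0_scatters.py | analyze_scatters
-- ===== SOURCE A (Python) =====
-- def analyze_scatters(rows):
--     """Analyze current scatter distribution"""
--     scatter_positions = []  # (row_idx, reel_idx)
--     scatter_counts = [0, 0, 0, 0, 0]
--
--     for row_idx, row in enumerate(rows):
--         for reel_idx in range(5):
--             if row[reel_idx] == 'S':
--                 scatter_positions.append((row_idx, reel_idx))
--                 scatter_counts[reel_idx] += 1
--
--     return scatter_positions, scatter_counts
-- ===== SOURCE B (Python) =====
-- def analyze_scatters(rows):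
--     """Analyze current scatter distribution (column-wise: per-reel hit lists, then sort back to row-major)"""
--     cols = [[r for r, row in enumerate(rows) if row[c] == 'S'] for c in range(5)]
--     scatter_counts = [len(col) for col in cols]
--     scatter_positions = sorted(((r, c) for c in range(5) for r in cols[c]),
--                                key=lambda p: 5 * p[0] + p[1])
--     return scatter_positions, scatter_counts
-- ===== Notes on version B (the rewrite author's own statement) =====
-- stated objective: alternative
-- what changed: B traverses the grid column-wise: it builds one hit list per reel (giving the counts as the lists' lengths) and then sorts the column-major position pairs back into row-major order by the linear index 5*r+c, instead of A's single row-major scan maintaining both the position list and the count array.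
import Mathlib
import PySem

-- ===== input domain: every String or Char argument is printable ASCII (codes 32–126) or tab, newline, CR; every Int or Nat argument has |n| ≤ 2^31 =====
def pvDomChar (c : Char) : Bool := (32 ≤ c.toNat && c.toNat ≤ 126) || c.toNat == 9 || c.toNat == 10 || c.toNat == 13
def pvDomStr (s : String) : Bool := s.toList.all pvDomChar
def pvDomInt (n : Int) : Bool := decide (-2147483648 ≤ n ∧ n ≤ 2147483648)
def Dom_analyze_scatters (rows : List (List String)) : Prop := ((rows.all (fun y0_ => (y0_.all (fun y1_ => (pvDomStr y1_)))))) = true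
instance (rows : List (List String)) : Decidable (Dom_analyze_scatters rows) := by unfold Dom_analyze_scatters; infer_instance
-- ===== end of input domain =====

-- B analyzes the grid column-wise (one hit list per reel, counts = their lengths,
-- positions restored to row-major order by sorting on the linear index 5*r+c)
-- instead of A's single row-major scan (objective: alternative).

-- counts[c] += 1  (c is 0..4 inside Pre_, so toNat is exact here)
def pvBump (l : List Int) (i : Int) : List Int := l.set i.toNat (l.getD i.toNat 0 + 1)

-- ===== PORT A =====
def analyze_scatters (rows : List (List String)) : (List (Int × Int)) × List Int :=
  (PySem.List.enumerate rows).foldl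
    (fun st p =>
      (PySem.List.pyRange 0 5 1).foldl
        (fun st c =>
          if (PySem.List.pyGet? p.2 c).getD "" == "S" then
            (st.1 ++ [(p.1, c)], pvBump st.2 c)
          else st)
        st)
    ([], [0, 0, 0, 0, 0])

-- ===== PORT B =====
-- [r for r, row in enumerate(rows) if row[c] == 'S']
def pvColHits (rows : List (List String)) (c : Int) : List Int :=
  ((PySem.List.enumerate rows).filter
    (fun p => (PySem.List.pyGet? p.2 c).getD "" == "S")).map (fun p => p.1)

def analyze_scatters_alt (rows : List (List String)) : (List (Int × Int)) × List Int :=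
  let cols := (PySem.List.pyRange 0 5 1).map (fun c => pvColHits rows c)
  let counts := cols.map (fun col => (col.length : Int))
  let positions := PySem.List.sorted
      ((PySem.List.pyRange 0 5 1).flatMap
        (fun c => ((PySem.List.pyGet? cols c).getD []).map (fun r => (r, c))))
      (fun p => 5 * p.1 + p.2)
  (positions, counts)

-- ===== PRECONDITION & SPEC =====
-- Python A indexes row[0..4] in every row, so it raises IndexError on any row shorter than 5.
def Pre_analyze_scatters (rows : List (List String)) : Prop :=
  ∀ row ∈ rows, 5 ≤ row.length
instance (rows : List (List String)) : Decidable (Pre_analyze_scatters rows) := by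
  unfold Pre_analyze_scatters; infer_instance

def pvWitness_analyze_scatters : List (List String) :=
  [["S", "x", "S", ".", "S"], ["a", "b", "c", "d", "e"]]

def Spec_analyze_scatters (rows : List (List String)) (out : (List (Int × Int)) × List Int) : Prop := out = analyze_scatters_alt rows
instance (rows : List (List String)) (out : (List (Int × Int)) × List Int) : Decidable (Spec_analyze_scatters rows out) := by unfold Spec_analyze_scatters; infer_instance

-- ===== CLAIM (what is proved, stated in full; the proofs are below) =====
def Claim_equal_analyze_scatters : Prop := ∀ (rows : List (List String)), Dom_analyze_scatters rows → Pre_analyze_scatters rows → Spec_analyze_scatters rows (analyze_scatters rows)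

-- ===== LEMMAS AND PROOFS =====

-- proof-only abbreviations
def pvHit (row : List String) (c : Int) : Bool := (PySem.List.pyGet? row c).getD "" == "S"
def pvRowHits (r : Int) (row : List String) : List (Int × Int) :=
  ((PySem.List.pyRange 0 5 1).filter (pvHit row)).map (fun c => (r, c))
def pvRowMajor (rows : List (List String)) : List (Int × Int) :=
  (PySem.List.enumerate rows).flatMap (fun p => pvRowHits p.1 p.2)

theorem pv_range5 : PySem.List.pyRange 0 5 1 = [0, 1, 2, 3, 4] := by decide

-- A's inner loop over one row = append the row's hits, fold pvBump over their reel indices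
theorem pv_inner (r : Int) (row : List String) (cs : List Int)
    (st : (List (Int × Int)) × List Int) :
    cs.foldl
        (fun st c =>
          if (PySem.List.pyGet? row c).getD "" == "S" then
            (st.1 ++ [(r, c)], pvBump st.2 c)
          else st) st
      = (st.1 ++ ((cs.filter (pvHit row)).map (fun c => (r, c))),
         (cs.filter (pvHit row)).foldl pvBump st.2) := by
  induction cs generalizing st with
  | nil => simp
  | cons c cs ih =>
      rw [List.foldl_cons, List.filter_cons]
      by_cases h : ((PySem.List.pyGet? row c).getD "" == "S") = true
      · rw [if_pos h, ih]; simp [pvHit, h]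
      · rw [if_neg h, ih]; simp [pvHit, h]

-- A's outer loop = row-major position list + a pvBump pass over its reel indices
theorem pv_outer (l : List (Int × List String)) (st : (List (Int × Int)) × List Int) :
    l.foldl
        (fun st p =>
          (PySem.List.pyRange 0 5 1).foldl
            (fun st c =>
              if (PySem.List.pyGet? p.2 c).getD "" == "S" then
                (st.1 ++ [(p.1, c)], pvBump st.2 c)
              else st) st) st
      = (st.1 ++ l.flatMap (fun p => pvRowHits p.1 p.2),
         (l.flatMap (fun p => pvRowHits p.1 p.2)).foldl (fun cnt q => pvBump cnt q.2) st.2) := by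
  induction l generalizing st with
  | nil => simp
  | cons p l ih =>
      rw [List.foldl_cons, pv_inner, ih]
      simp [pvRowHits, List.foldl_map, List.foldl_append]

-- transpose permutation helper: flatMap of 'maybe-cons' ~ the consed heads ++ flatMap of tails
theorem pv_perm_cons {α β : Type} (cs : List α) (q : α → Bool) (f : α → β) (g : α → List β) :
    (cs.flatMap (fun c => if q c then f c :: g c else g c)).Perm
      ((cs.filter q).map f ++ cs.flatMap g) := by
  induction cs with
  | nil => simp
  | cons c cs ih =>
      rw [List.flatMap_cons, List.filter_cons, List.flatMap_cons]
      by_cases h : q c = true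
      · simp only [h, if_pos]
        rw [List.map_cons, List.cons_append, List.cons_append]
        refine List.Perm.cons _ ?_
        exact (List.Perm.append_left (g c) ih).trans
          (List.perm_append_comm_assoc (g c) ((cs.filter q).map f) (cs.flatMap g))
      · simp only [h, if_neg, Bool.false_eq_true, not_false_iff]
        exact (List.Perm.append_left (g c) ih).trans
          (List.perm_append_comm_assoc (g c) ((cs.filter q).map f) (cs.flatMap g))

-- column-major list is a permutation of the row-major list
theorem pv_transpose (cs : List Int) (l : List (Int × List String)) :
    (cs.flatMap (fun c => ((l.filter (fun p => pvHit p.2 c)).map (fun p => p.1)).map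
        (fun r => (r, c)))).Perm
      (l.flatMap (fun p => (cs.filter (pvHit p.2)).map (fun c => (p.1, c)))) := by
  induction l with
  | nil => simp
  | cons p l ih =>
      have h1 : cs.flatMap (fun c => (((p :: l).filter (fun p => pvHit p.2 c)).map
            (fun p => p.1)).map (fun r => (r, c)))
          = cs.flatMap (fun c => if pvHit p.2 c then ((p.1, c) : Int × Int) ::
                (((l.filter (fun p => pvHit p.2 c)).map (fun p => p.1)).map (fun r => (r, c)))
              else ((l.filter (fun p => pvHit p.2 c)).map (fun p => p.1)).map (fun r => (r, c))) := by
        refine List.flatMap_congr ?_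
        intro c _
        rw [List.filter_cons]
        by_cases h : pvHit p.2 c = true <;> simp [h]
      rw [h1, List.flatMap_cons]
      exact (pv_perm_cons cs (pvHit p.2) _ _).trans
        (List.Perm.append_left _ ih)

-- the enumerate indices strictly increase
theorem pv_enum_ge {α : Type} (l : List α) (k : Int) :
    ∀ p ∈ PySem.List.enumerate l k, k ≤ p.1 := by
  induction l generalizing k with
  | nil => simp [PySem.List.enumerate]
  | cons x l ih =>
      rw [PySem.List.enumerate]
      intro p hp
      rcases List.mem_cons.mp hp with rfl | h
      · omega
      · have := ih (k + 1) p h; omega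

theorem pv_enum_mono {α : Type} (l : List α) (k : Int) :
    (PySem.List.enumerate l k).Pairwise (fun p q => p.1 < q.1) := by
  induction l generalizing k with
  | nil => simp [PySem.List.enumerate]
  | cons x l ih =>
      rw [PySem.List.enumerate]
      refine List.Pairwise.cons ?_ (ih (k + 1))
      intro q hq
      have := pv_enum_ge l (k + 1) q hq
      omega

theorem pv_mem_rowHits {r : Int} {row : List String} {x : Int × Int}
    (hx : x ∈ pvRowHits r row) : x.1 = r ∧ 0 ≤ x.2 ∧ x.2 ≤ 4 := by
  unfold pvRowHits at hx
  rw [pv_range5] at hx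
  rcases List.mem_map.mp hx with ⟨c, hc, rfl⟩
  have := List.mem_filter.mp hc |>.1
  simp only [List.mem_cons] at this
  rcases this with rfl | rfl | rfl | rfl | rfl | h
  all_goals first | (refine ⟨rfl, by omega, by omega⟩) | cases h

-- the row-major list is strictly increasing under the key 5*r+c
theorem pv_rowMajor_pairwise (rows : List (List String)) :
    (pvRowMajor rows).Pairwise (fun a b => 5 * a.1 + a.2 < 5 * b.1 + b.2) := by
  unfold pvRowMajor
  rw [List.pairwise_flatMap]
  constructor
  · intro p _
    unfold pvRowHits
    rw [List.pairwise_map]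
    have h5 : (PySem.List.pyRange 0 5 1).Pairwise (fun a b : Int => a < b) := by
      rw [pv_range5]; decide
    have := h5.filter (pvHit p.2)
    exact this.imp (by intro a b hab; omega)
  · have := pv_enum_mono rows 0
    refine this.imp ?_
    intro p q hpq x hx y hy
    have h1 := pv_mem_rowHits hx
    have h2 := pv_mem_rowHits hy
    omega

-- every reel index in the row-major list is one of 0..4
theorem pv_mem_rowMajor (rows : List (List String)) :
    ∀ q ∈ pvRowMajor rows, q.2 = 0 ∨ q.2 = 1 ∨ q.2 = 2 ∨ q.2 = 3 ∨ q.2 = 4 := by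
  intro q hq
  rcases List.mem_flatMap.mp hq with ⟨p, _, hx⟩
  have := pv_mem_rowHits hx
  omega

-- folding pvBump over reel indices 0..4 counts occurrences per reel
theorem pv_bump_fold (qs : List (Int × Int)) :
    ∀ (a0 a1 a2 a3 a4 : Int),
    (∀ q ∈ qs, q.2 = 0 ∨ q.2 = 1 ∨ q.2 = 2 ∨ q.2 = 3 ∨ q.2 = 4) →
    qs.foldl (fun cnt q => pvBump cnt q.2) [a0, a1, a2, a3, a4]
      = [a0 + List.countP (fun q => q.2 == (0 : Int)) qs,
         a1 + List.countP (fun q => q.2 == (1 : Int)) qs,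
         a2 + List.countP (fun q => q.2 == (2 : Int)) qs,
         a3 + List.countP (fun q => q.2 == (3 : Int)) qs,
         a4 + List.countP (fun q => q.2 == (4 : Int)) qs] := by
  induction qs with
  | nil => intro a0 a1 a2 a3 a4 _; simp
  | cons q qs ih =>
      intro a0 a1 a2 a3 a4 h
      have hq := h q (List.mem_cons_self ..)
      have htl : ∀ q ∈ qs, q.2 = 0 ∨ q.2 = 1 ∨ q.2 = 2 ∨ q.2 = 3 ∨ q.2 = 4 := by
        intro x hx; exact h x (List.mem_cons_of_mem _ hx)
      rw [List.foldl_cons]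
      rcases hq with hq | hq | hq | hq | hq
      · have hb : pvBump [a0, a1, a2, a3, a4] q.2 = [a0 + 1, a1, a2, a3, a4] := by
          simp [pvBump, hq]
        rw [hb, ih _ _ _ _ _ htl]
        simp only [List.countP_cons, hq, List.cons.injEq]
        norm_num
        omega
      · have hb : pvBump [a0, a1, a2, a3, a4] q.2 = [a0, a1 + 1, a2, a3, a4] := by
          simp [pvBump, hq]
        rw [hb, ih _ _ _ _ _ htl]
        simp only [List.countP_cons, hq, List.cons.injEq]
        norm_num
        omega
      · have hb : pvBump [a0, a1, a2, a3, a4] q.2 = [a0, a1, a2 + 1, a3, a4] := by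
          simp [pvBump, hq]
        rw [hb, ih _ _ _ _ _ htl]
        simp only [List.countP_cons, hq, List.cons.injEq]
        norm_num
        omega
      · have hb : pvBump [a0, a1, a2, a3, a4] q.2 = [a0, a1, a2, a3 + 1, a4] := by
          simp [pvBump, hq]
        rw [hb, ih _ _ _ _ _ htl]
        simp only [List.countP_cons, hq, List.cons.injEq]
        norm_num
        omega
      · have hb : pvBump [a0, a1, a2, a3, a4] q.2 = [a0, a1, a2, a3, a4 + 1] := by
          simp [pvBump, hq]
        rw [hb, ih _ _ _ _ _ htl]
        simp only [List.countP_cons, hq, List.cons.injEq]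
        norm_num
        omega

-- per-row reel count: each row's hit list contains reel c once iff the row hits c
theorem pv_row_count (c : Int)
    (hc : c = 0 ∨ c = 1 ∨ c = 2 ∨ c = 3 ∨ c = 4) (r : Int) (row : List String) :
    List.countP (fun q => q.2 == c) (pvRowHits r row)
      = if pvHit row c then 1 else 0 := by
  unfold pvRowHits
  rw [List.countP_map, pv_range5]
  rcases hc with rfl | rfl | rfl | rfl | rfl <;>
    · cases h : pvHit row _ <;>
        simp [List.countP_filter, h, Function.comp]

-- the row-major count of reel c equals the length of column c's hit list
theorem pv_count_col (c : Int)
    (hc : c = 0 ∨ c = 1 ∨ c = 2 ∨ c = 3 ∨ c = 4) (l : List (Int × List String)) :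
    List.countP (fun q => q.2 == c) (l.flatMap (fun p => pvRowHits p.1 p.2))
      = List.countP (fun p => pvHit p.2 c) l := by
  induction l with
  | nil => simp
  | cons p l ih =>
      rw [List.flatMap_cons, List.countP_append, ih, pv_row_count c hc]
      rw [List.countP_cons]
      cases h : pvHit p.2 c
      · simp
      · simp; omega

theorem pv_colHits_len (rows : List (List String)) (c : Int) :
    ((pvColHits rows c).length : Int)
      = List.countP (fun p => pvHit p.2 c) (PySem.List.enumerate rows) := by
  unfold pvColHits pvHit
  rw [List.length_map, ← List.countP_eq_length_filter]

-- B unfolded to colMajor + lengths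
theorem pv_alt_eq (rows : List (List String)) :
    analyze_scatters_alt rows
      = (PySem.List.sorted
            (([0, 1, 2, 3, 4] : List Int).flatMap
              (fun c => (pvColHits rows c).map (fun r => (r, c))))
            (fun p => 5 * p.1 + p.2),
         [((pvColHits rows 0).length : Int), ((pvColHits rows 1).length : Int),
          ((pvColHits rows 2).length : Int), ((pvColHits rows 3).length : Int),
          ((pvColHits rows 4).length : Int)]) := by
  unfold analyze_scatters_alt
  rw [pv_range5]
  simp [PySem.List.pyGet?, PySem.List.pyIdx?]

-- ===== VERDICT (by name: the statement is the Claim_ definition above) =====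
theorem analyze_scatters_spec : Claim_equal_analyze_scatters := by
  intro rows _ _
  unfold Spec_analyze_scatters
  have hA : analyze_scatters rows
      = (pvRowMajor rows,
         (pvRowMajor rows).foldl (fun cnt q => pvBump cnt q.2) [0, 0, 0, 0, 0]) := by
    unfold analyze_scatters pvRowMajor
    rw [pv_outer]
    simp
  rw [hA, pv_alt_eq]
  have hperm : (([0, 1, 2, 3, 4] : List Int).flatMap
        (fun c => (pvColHits rows c).map (fun r => (r, c)))).Perm (pvRowMajor rows) := by
    unfold pvColHits pvRowMajor pvRowHits
    have := pv_transpose [0, 1, 2, 3, 4] (PySem.List.enumerate rows)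
    rw [pv_range5]
    exact this.trans (by rfl)
  have hsorted := PySem.List.sorted_eq_of_perm_of_pairwise_lt _ (pvRowMajor rows)
      (fun p => 5 * p.1 + p.2) hperm.symm (pv_rowMajor_pairwise rows)
  have hcnt := pv_bump_fold (pvRowMajor rows) 0 0 0 0 0 (pv_mem_rowMajor rows)
  rw [hcnt, hsorted]
  refine Prod.ext rfl ?_
  simp only [zero_add]
  rw [pv_colHits_len, pv_colHits_len, pv_colHits_len, pv_colHits_len, pv_colHits_len]
  unfold pvRowMajor
  rw [pv_count_col 0 (by omega), pv_count_col 1 (by omega), pv_count_col 2 (by omega),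
      pv_count_col 3 (by omega), pv_count_col 4 (by omega)]
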